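-- pv_equiv track=rewrite | github.com/dj-fractalus/leap-midi-lights | rpi_upd2lights_ledbrain/animations/resizable_camaleon_dancing_worms.py | getCloserFibo
-- ===== SOURCE A (Python) =====
-- fibo =[1,2,3,5,8,13,21,34,55,89]
--
-- def getCloserFibo(n):
-- 	minDiff=9999999999999
-- 	valueForMinDiff=fibo[0]
-- 	for f in fibo:
-- 		if minDiff > abs(f-n):
-- 			minDiff = abs(f-n)
-- 			valueForMinDiff = f
-- 	return valueForMinDiff
-- ===== SOURCE B (Python) =====
-- fibo = [1, 2, 3, 5, 8, 13, 21, 34, 55, 89]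
--
-- def getCloserFibo(n):
--     # binary search (bisect_left) for n in the sorted fibo list, then compare the two neighbors
--     lo, hi = 0, len(fibo)
--     while lo < hi:
--         mid = (lo + hi) // 2
--         if fibo[mid] < n:
--             lo = mid + 1
--         else:
--             hi = mid
--     if lo == 0:
--         return fibo[0]
--     if lo == len(fibo):
--         return fibo[-1]
--     l, r = fibo[lo - 1], fibo[lo]
--     return r if r - n < n - l else l
-- ===== Notes on version B (the rewrite author's own statement) =====
-- stated objective: alternative
-- what changed: Replaces the full linear scan keeping a running min-distance with a binary search (bisect_left) over the sorted fixed list followed by a constant-time comparison of the two neighboring candidates, tie going to the smaller value as in A.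
import Mathlib
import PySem

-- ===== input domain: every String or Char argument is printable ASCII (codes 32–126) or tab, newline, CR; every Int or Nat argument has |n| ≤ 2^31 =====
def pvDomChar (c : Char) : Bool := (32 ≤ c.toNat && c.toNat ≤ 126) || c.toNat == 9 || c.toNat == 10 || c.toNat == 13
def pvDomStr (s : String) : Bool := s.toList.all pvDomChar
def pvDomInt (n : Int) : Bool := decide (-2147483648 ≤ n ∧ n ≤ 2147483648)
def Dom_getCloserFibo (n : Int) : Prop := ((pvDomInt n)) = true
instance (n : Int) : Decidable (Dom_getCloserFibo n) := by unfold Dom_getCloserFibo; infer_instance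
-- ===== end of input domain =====

-- B replaces A's linear min-distance scan with a binary search plus a constant neighbor check (alternative decomposition, same results).

-- ===== PORT A =====
def fibo : List Int := [1, 2, 3, 5, 8, 13, 21, 34, 55, 89]

-- Python's abs on an int (exact)
def pyAbsInt (x : Int) : Int := if x < 0 then -x else x

def getCloserFibo (n : Int) : Int :=
  (fibo.foldl (fun (st : Int × Int) f =>
      if st.1 > pyAbsInt (f - n) then (pyAbsInt (f - n), f) else st)
    (9999999999999, fibo.getD 0 0)).2

-- ===== PORT B =====
-- the bisect_left while-loop of Source B, recursion on hi - lo
def bisectLeft (xs : List Int) (x : Int) (lo hi : Nat) : Nat :=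
  if _h : lo < hi then
    let mid := (lo + hi) / 2
    if xs.getD mid 0 < x then bisectLeft xs x (mid + 1) hi
    else bisectLeft xs x lo mid
  else lo
termination_by hi - lo
decreasing_by all_goals omega

def getCloserFibo_alt (n : Int) : Int :=
  let i := bisectLeft fibo n 0 fibo.length
  if i = 0 then fibo.getD 0 0
  else if i = fibo.length then fibo.getD (fibo.length - 1) 0
  else
    let l := fibo.getD (i - 1) 0
    let r := fibo.getD i 0
    if r - n < n - l then r else l

-- ===== PRECONDITION & SPEC =====
def Spec_getCloserFibo (n : Int) (out : Int) : Prop := out = getCloserFibo_alt n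
instance (n : Int) (out : Int) : Decidable (Spec_getCloserFibo n out) := by unfold Spec_getCloserFibo; infer_instance

-- ===== CLAIM (what is proved, stated in full; the proofs are below) =====
def Claim_equal_getCloserFibo : Prop := ∀ (n : Int), Dom_getCloserFibo n → Spec_getCloserFibo n (getCloserFibo n)

-- ===== LEMMAS AND PROOFS =====

-- hub closed form used by both directions: the closest fibo value by midpoint comparisons (ties to the smaller value)
def F (n : Int) : Int :=
  if 2*n ≤ 3 then 1 else if 2*n ≤ 5 then 2 else if n ≤ 4 then 3
  else if 2*n ≤ 13 then 5 else if 2*n ≤ 21 then 8 else if n ≤ 17 then 13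
  else if 2*n ≤ 55 then 21 else if 2*n ≤ 89 then 34 else if n ≤ 72 then 55 else 89

-- the value of F on each of its ten intervals
lemma F_val_1 (n : Int) (h : 2*n ≤ 3) : F n = 1 := by
  simp only [F]; split_ifs <;> omega

lemma F_val_2 (n : Int) (h : 3 < 2*n ∧ 2*n ≤ 5) : F n = 2 := by
  simp only [F]; split_ifs <;> omega

lemma F_val_3 (n : Int) (h : 5 < 2*n ∧ n ≤ 4) : F n = 3 := by
  simp only [F]; split_ifs <;> omega

lemma F_val_5 (n : Int) (h : 4 < n ∧ 2*n ≤ 13) : F n = 5 := by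
  simp only [F]; split_ifs <;> omega

lemma F_val_8 (n : Int) (h : 13 < 2*n ∧ 2*n ≤ 21) : F n = 8 := by
  simp only [F]; split_ifs <;> omega

lemma F_val_13 (n : Int) (h : 21 < 2*n ∧ n ≤ 17) : F n = 13 := by
  simp only [F]; split_ifs <;> omega

lemma F_val_21 (n : Int) (h : 17 < n ∧ 2*n ≤ 55) : F n = 21 := by
  simp only [F]; split_ifs <;> omega

lemma F_val_34 (n : Int) (h : 55 < 2*n ∧ 2*n ≤ 89) : F n = 34 := by
  simp only [F]; split_ifs <;> omega

lemma F_val_55 (n : Int) (h : 89 < 2*n ∧ n ≤ 72) : F n = 55 := by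
  simp only [F]; split_ifs <;> omega

lemma F_val_89 (n : Int) (h : 72 < n) : F n = 89 := by
  simp only [F]; split_ifs <;> omega


-- A's running (minDiff, value) state keeps v over f exactly when |v-n| ≤ |f-n|
def gsel (n v f : Int) : Int := if (v - n).natAbs ≤ (f - n).natAbs then v else f

lemma gsel_keep {n v f : Int} (h : (v - n).natAbs ≤ (f - n).natAbs) : gsel n v f = v := by
  unfold gsel; rw [if_pos h]

lemma gsel_drop {n v f : Int} (h : ¬ (v - n).natAbs ≤ (f - n).natAbs) : gsel n v f = f := by
  unfold gsel; rw [if_neg h]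

lemma pyAbsInt_natAbs (x : Int) : pyAbsInt x = (x.natAbs : Int) := by
  simp only [pyAbsInt]; split_ifs <;> omega

lemma fold_inv (n : Int) : ∀ (l : List Int) (v : Int),
    l.foldl (fun (st : Int × Int) f =>
        if st.1 > pyAbsInt (f - n) then (pyAbsInt (f - n), f) else st)
      (pyAbsInt (v - n), v)
    = (pyAbsInt (l.foldl (gsel n) v - n), l.foldl (gsel n) v) := by
  intro l
  induction l with
  | nil => intro v; rfl
  | cons f t ih =>
    intro v
    simp only [List.foldl_cons]
    have h : (if pyAbsInt (v - n) > pyAbsInt (f - n) then (pyAbsInt (f - n), f)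
              else (pyAbsInt (v - n), v)) = (pyAbsInt (gsel n v f - n), gsel n v f) := by
      simp only [gsel, pyAbsInt_natAbs]
      split_ifs <;> first | rfl | (exfalso; omega)
    rw [h, ih]

set_option maxHeartbeats 4000000 in
lemma A_eval (n : Int) (hl : -2147483648 ≤ n) (hr : n ≤ 2147483648) :
    getCloserFibo n = F n := by
  unfold getCloserFibo
  rw [show (fibo.getD 0 0 : Int) = 1 from rfl]
  rw [show fibo = 1 :: [2, 3, 5, 8, 13, 21, 34, 55, 89] from rfl]
  rw [List.foldl_cons]
  rw [if_pos (by rw [pyAbsInt_natAbs]; omega :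
        (9999999999999 : Int) > pyAbsInt (1 - n))]
  rw [show (pyAbsInt (1 - n), (1:Int)) = (pyAbsInt ((1:Int) - n), (1:Int)) from rfl]
  rw [fold_inv]
  clear hl hr
  show List.foldl (gsel n) 1 [2, 3, 5, 8, 13, 21, 34, 55, 89] = F n
  rw [List.foldl_cons]
  by_cases h1 : ((1:Int) - n).natAbs ≤ ((2:Int) - n).natAbs
  · rw [gsel_keep h1]
    rw [List.foldl_cons]
    by_cases h2 : ((1:Int) - n).natAbs ≤ ((3:Int) - n).natAbs
    · rw [gsel_keep h2]
      rw [List.foldl_cons]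
      by_cases h3 : ((1:Int) - n).natAbs ≤ ((5:Int) - n).natAbs
      · rw [gsel_keep h3]
        rw [List.foldl_cons]
        by_cases h4 : ((1:Int) - n).natAbs ≤ ((8:Int) - n).natAbs
        · rw [gsel_keep h4]
          rw [List.foldl_cons]
          by_cases h5 : ((1:Int) - n).natAbs ≤ ((13:Int) - n).natAbs
          · rw [gsel_keep h5]
            rw [List.foldl_cons]
            by_cases h6 : ((1:Int) - n).natAbs ≤ ((21:Int) - n).natAbs
            · rw [gsel_keep h6]
              rw [List.foldl_cons]
              by_cases h7 : ((1:Int) - n).natAbs ≤ ((34:Int) - n).natAbs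
              · rw [gsel_keep h7]
                rw [List.foldl_cons]
                by_cases h8 : ((1:Int) - n).natAbs ≤ ((55:Int) - n).natAbs
                · rw [gsel_keep h8]
                  rw [List.foldl_cons]
                  by_cases h9 : ((1:Int) - n).natAbs ≤ ((89:Int) - n).natAbs
                  · rw [gsel_keep h9]
                    exact (F_val_1 n (by omega)).symm
                  · rw [gsel_drop h9]
                    exfalso; omega
                · rw [gsel_drop h8]
                  exfalso; omega
              · rw [gsel_drop h7]
                exfalso; omega
            · rw [gsel_drop h6]
              exfalso; omega
          · rw [gsel_drop h5]
            exfalso; omega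
        · rw [gsel_drop h4]
          exfalso; omega
      · rw [gsel_drop h3]
        exfalso; omega
    · rw [gsel_drop h2]
      exfalso; omega
  · rw [gsel_drop h1]
    rw [List.foldl_cons]
    by_cases h10 : ((2:Int) - n).natAbs ≤ ((3:Int) - n).natAbs
    · rw [gsel_keep h10]
      rw [List.foldl_cons]
      by_cases h11 : ((2:Int) - n).natAbs ≤ ((5:Int) - n).natAbs
      · rw [gsel_keep h11]
        rw [List.foldl_cons]
        by_cases h12 : ((2:Int) - n).natAbs ≤ ((8:Int) - n).natAbs
        · rw [gsel_keep h12]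
          rw [List.foldl_cons]
          by_cases h13 : ((2:Int) - n).natAbs ≤ ((13:Int) - n).natAbs
          · rw [gsel_keep h13]
            rw [List.foldl_cons]
            by_cases h14 : ((2:Int) - n).natAbs ≤ ((21:Int) - n).natAbs
            · rw [gsel_keep h14]
              rw [List.foldl_cons]
              by_cases h15 : ((2:Int) - n).natAbs ≤ ((34:Int) - n).natAbs
              · rw [gsel_keep h15]
                rw [List.foldl_cons]
                by_cases h16 : ((2:Int) - n).natAbs ≤ ((55:Int) - n).natAbs
                · rw [gsel_keep h16]
                  rw [List.foldl_cons]
                  by_cases h17 : ((2:Int) - n).natAbs ≤ ((89:Int) - n).natAbs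
                  · rw [gsel_keep h17]
                    exact (F_val_2 n (by omega)).symm
                  · rw [gsel_drop h17]
                    exfalso; omega
                · rw [gsel_drop h16]
                  exfalso; omega
              · rw [gsel_drop h15]
                exfalso; omega
            · rw [gsel_drop h14]
              exfalso; omega
          · rw [gsel_drop h13]
            exfalso; omega
        · rw [gsel_drop h12]
          exfalso; omega
      · rw [gsel_drop h11]
        exfalso; omega
    · rw [gsel_drop h10]
      rw [List.foldl_cons]
      by_cases h18 : ((3:Int) - n).natAbs ≤ ((5:Int) - n).natAbs
      · rw [gsel_keep h18]
        rw [List.foldl_cons]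
        by_cases h19 : ((3:Int) - n).natAbs ≤ ((8:Int) - n).natAbs
        · rw [gsel_keep h19]
          rw [List.foldl_cons]
          by_cases h20 : ((3:Int) - n).natAbs ≤ ((13:Int) - n).natAbs
          · rw [gsel_keep h20]
            rw [List.foldl_cons]
            by_cases h21 : ((3:Int) - n).natAbs ≤ ((21:Int) - n).natAbs
            · rw [gsel_keep h21]
              rw [List.foldl_cons]
              by_cases h22 : ((3:Int) - n).natAbs ≤ ((34:Int) - n).natAbs
              · rw [gsel_keep h22]
                rw [List.foldl_cons]
                by_cases h23 : ((3:Int) - n).natAbs ≤ ((55:Int) - n).natAbs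
                · rw [gsel_keep h23]
                  rw [List.foldl_cons]
                  by_cases h24 : ((3:Int) - n).natAbs ≤ ((89:Int) - n).natAbs
                  · rw [gsel_keep h24]
                    exact (F_val_3 n (by omega)).symm
                  · rw [gsel_drop h24]
                    exfalso; omega
                · rw [gsel_drop h23]
                  exfalso; omega
              · rw [gsel_drop h22]
                exfalso; omega
            · rw [gsel_drop h21]
              exfalso; omega
          · rw [gsel_drop h20]
            exfalso; omega
        · rw [gsel_drop h19]
          exfalso; omega
      · rw [gsel_drop h18]
        rw [List.foldl_cons]
        by_cases h25 : ((5:Int) - n).natAbs ≤ ((8:Int) - n).natAbs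
        · rw [gsel_keep h25]
          rw [List.foldl_cons]
          by_cases h26 : ((5:Int) - n).natAbs ≤ ((13:Int) - n).natAbs
          · rw [gsel_keep h26]
            rw [List.foldl_cons]
            by_cases h27 : ((5:Int) - n).natAbs ≤ ((21:Int) - n).natAbs
            · rw [gsel_keep h27]
              rw [List.foldl_cons]
              by_cases h28 : ((5:Int) - n).natAbs ≤ ((34:Int) - n).natAbs
              · rw [gsel_keep h28]
                rw [List.foldl_cons]
                by_cases h29 : ((5:Int) - n).natAbs ≤ ((55:Int) - n).natAbs
                · rw [gsel_keep h29]
                  rw [List.foldl_cons]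
                  by_cases h30 : ((5:Int) - n).natAbs ≤ ((89:Int) - n).natAbs
                  · rw [gsel_keep h30]
                    exact (F_val_5 n (by omega)).symm
                  · rw [gsel_drop h30]
                    exfalso; omega
                · rw [gsel_drop h29]
                  exfalso; omega
              · rw [gsel_drop h28]
                exfalso; omega
            · rw [gsel_drop h27]
              exfalso; omega
          · rw [gsel_drop h26]
            exfalso; omega
        · rw [gsel_drop h25]
          rw [List.foldl_cons]
          by_cases h31 : ((8:Int) - n).natAbs ≤ ((13:Int) - n).natAbs
          · rw [gsel_keep h31]
            rw [List.foldl_cons]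
            by_cases h32 : ((8:Int) - n).natAbs ≤ ((21:Int) - n).natAbs
            · rw [gsel_keep h32]
              rw [List.foldl_cons]
              by_cases h33 : ((8:Int) - n).natAbs ≤ ((34:Int) - n).natAbs
              · rw [gsel_keep h33]
                rw [List.foldl_cons]
                by_cases h34 : ((8:Int) - n).natAbs ≤ ((55:Int) - n).natAbs
                · rw [gsel_keep h34]
                  rw [List.foldl_cons]
                  by_cases h35 : ((8:Int) - n).natAbs ≤ ((89:Int) - n).natAbs
                  · rw [gsel_keep h35]
                    exact (F_val_8 n (by omega)).symm
                  · rw [gsel_drop h35]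
                    exfalso; omega
                · rw [gsel_drop h34]
                  exfalso; omega
              · rw [gsel_drop h33]
                exfalso; omega
            · rw [gsel_drop h32]
              exfalso; omega
          · rw [gsel_drop h31]
            rw [List.foldl_cons]
            by_cases h36 : ((13:Int) - n).natAbs ≤ ((21:Int) - n).natAbs
            · rw [gsel_keep h36]
              rw [List.foldl_cons]
              by_cases h37 : ((13:Int) - n).natAbs ≤ ((34:Int) - n).natAbs
              · rw [gsel_keep h37]
                rw [List.foldl_cons]
                by_cases h38 : ((13:Int) - n).natAbs ≤ ((55:Int) - n).natAbs
                · rw [gsel_keep h38]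
                  rw [List.foldl_cons]
                  by_cases h39 : ((13:Int) - n).natAbs ≤ ((89:Int) - n).natAbs
                  · rw [gsel_keep h39]
                    exact (F_val_13 n (by omega)).symm
                  · rw [gsel_drop h39]
                    exfalso; omega
                · rw [gsel_drop h38]
                  exfalso; omega
              · rw [gsel_drop h37]
                exfalso; omega
            · rw [gsel_drop h36]
              rw [List.foldl_cons]
              by_cases h40 : ((21:Int) - n).natAbs ≤ ((34:Int) - n).natAbs
              · rw [gsel_keep h40]
                rw [List.foldl_cons]
                by_cases h41 : ((21:Int) - n).natAbs ≤ ((55:Int) - n).natAbs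
                · rw [gsel_keep h41]
                  rw [List.foldl_cons]
                  by_cases h42 : ((21:Int) - n).natAbs ≤ ((89:Int) - n).natAbs
                  · rw [gsel_keep h42]
                    exact (F_val_21 n (by omega)).symm
                  · rw [gsel_drop h42]
                    exfalso; omega
                · rw [gsel_drop h41]
                  exfalso; omega
              · rw [gsel_drop h40]
                rw [List.foldl_cons]
                by_cases h43 : ((34:Int) - n).natAbs ≤ ((55:Int) - n).natAbs
                · rw [gsel_keep h43]
                  rw [List.foldl_cons]
                  by_cases h44 : ((34:Int) - n).natAbs ≤ ((89:Int) - n).natAbs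
                  · rw [gsel_keep h44]
                    exact (F_val_34 n (by omega)).symm
                  · rw [gsel_drop h44]
                    exfalso; omega
                · rw [gsel_drop h43]
                  rw [List.foldl_cons]
                  by_cases h45 : ((55:Int) - n).natAbs ≤ ((89:Int) - n).natAbs
                  · rw [gsel_keep h45]
                    exact (F_val_55 n (by omega)).symm
                  · rw [gsel_drop h45]
                    exact (F_val_89 n (by omega)).symm

-- evaluation of bisectLeft on fibo, one lemma per reachable (lo, hi) state of the search
lemma bis_10_10 (n : Int) : bisectLeft fibo n 10 10 = 10 := by
  rw [bisectLeft]; norm_num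

lemma bis_9_9 (n : Int) : bisectLeft fibo n 9 9 = 9 := by
  rw [bisectLeft]; norm_num

lemma bis_9_10 (n : Int) : bisectLeft fibo n 9 10 = (if 89 < n then 10 else 9) := by
  rw [bisectLeft]
  norm_num [show fibo[9]?.getD 0 = 89 from rfl, bis_10_10, bis_9_9]

lemma bis_8_8 (n : Int) : bisectLeft fibo n 8 8 = 8 := by
  rw [bisectLeft]; norm_num

lemma bis_7_7 (n : Int) : bisectLeft fibo n 7 7 = 7 := by
  rw [bisectLeft]; norm_num

lemma bis_6_6 (n : Int) : bisectLeft fibo n 6 6 = 6 := by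
  rw [bisectLeft]; norm_num

lemma bis_6_7 (n : Int) : bisectLeft fibo n 6 7 = (if 21 < n then 7 else 6) := by
  rw [bisectLeft]
  norm_num [show fibo[6]?.getD 0 = 21 from rfl, bis_7_7, bis_6_6]

lemma bis_6_8 (n : Int) : bisectLeft fibo n 6 8 = (if 34 < n then 8 else (if 21 < n then 7 else 6)) := by
  rw [bisectLeft]
  norm_num [show fibo[7]?.getD 0 = 34 from rfl, bis_8_8, bis_6_7]

lemma bis_6_10 (n : Int) : bisectLeft fibo n 6 10 = (if 55 < n then (if 89 < n then 10 else 9) else (if 34 < n then 8 else (if 21 < n then 7 else 6))) := by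
  rw [bisectLeft]
  norm_num [show fibo[8]?.getD 0 = 55 from rfl, bis_9_10, bis_6_8]

lemma bis_5_5 (n : Int) : bisectLeft fibo n 5 5 = 5 := by
  rw [bisectLeft]; norm_num

lemma bis_4_4 (n : Int) : bisectLeft fibo n 4 4 = 4 := by
  rw [bisectLeft]; norm_num

lemma bis_3_3 (n : Int) : bisectLeft fibo n 3 3 = 3 := by
  rw [bisectLeft]; norm_num

lemma bis_3_4 (n : Int) : bisectLeft fibo n 3 4 = (if 5 < n then 4 else 3) := by
  rw [bisectLeft]
  norm_num [show fibo[3]?.getD 0 = 5 from rfl, bis_4_4, bis_3_3]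

lemma bis_3_5 (n : Int) : bisectLeft fibo n 3 5 = (if 8 < n then 5 else (if 5 < n then 4 else 3)) := by
  rw [bisectLeft]
  norm_num [show fibo[4]?.getD 0 = 8 from rfl, bis_5_5, bis_3_4]

lemma bis_2_2 (n : Int) : bisectLeft fibo n 2 2 = 2 := by
  rw [bisectLeft]; norm_num

lemma bis_1_1 (n : Int) : bisectLeft fibo n 1 1 = 1 := by
  rw [bisectLeft]; norm_num

lemma bis_0_0 (n : Int) : bisectLeft fibo n 0 0 = 0 := by
  rw [bisectLeft]; norm_num

lemma bis_0_1 (n : Int) : bisectLeft fibo n 0 1 = (if 1 < n then 1 else 0) := by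
  rw [bisectLeft]
  norm_num [show fibo[0]?.getD 0 = 1 from rfl, bis_1_1, bis_0_0]

lemma bis_0_2 (n : Int) : bisectLeft fibo n 0 2 = (if 2 < n then 2 else (if 1 < n then 1 else 0)) := by
  rw [bisectLeft]
  norm_num [show fibo[1]?.getD 0 = 2 from rfl, bis_2_2, bis_0_1]

lemma bis_0_5 (n : Int) : bisectLeft fibo n 0 5 = (if 3 < n then (if 8 < n then 5 else (if 5 < n then 4 else 3)) else (if 2 < n then 2 else (if 1 < n then 1 else 0))) := by
  rw [bisectLeft]
  norm_num [show fibo[2]?.getD 0 = 3 from rfl, bis_3_5, bis_0_2]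

lemma bis_0_10 (n : Int) : bisectLeft fibo n 0 10 = (if 13 < n then (if 55 < n then (if 89 < n then 10 else 9) else (if 34 < n then 8 else (if 21 < n then 7 else 6))) else (if 3 < n then (if 8 < n then 5 else (if 5 < n then 4 else 3)) else (if 2 < n then 2 else (if 1 < n then 1 else 0)))) := by
  rw [bisectLeft]
  norm_num [show fibo[5]?.getD 0 = 13 from rfl, bis_6_10, bis_0_5]


set_option maxHeartbeats 4000000 in
lemma B_eval (n : Int) : getCloserFibo_alt n = F n := by
  unfold getCloserFibo_alt
  by_cases g0 : (13:Int) < n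
  · -- search right half
    by_cases g1 : (55:Int) < n
    · -- search right half
      by_cases g2 : (89:Int) < n
      · -- search right half
        have hi : bisectLeft fibo n 0 10 = 10 := by rw [bis_0_10]; norm_num [g0, g1, g2]
        rw [show fibo.length = 10 from rfl, hi]
        norm_num [fibo]
        exact (F_val_89 n (by omega)).symm
      · -- search left half
        have hi : bisectLeft fibo n 0 10 = 9 := by rw [bis_0_10]; norm_num [g0, g1, g2]
        rw [show fibo.length = 10 from rfl, hi]
        norm_num [fibo]
        split_ifs with hc
        · exact (F_val_89 n (by omega)).symm
        · exact (F_val_55 n (by omega)).symm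
    · -- search left half
      by_cases g2 : (34:Int) < n
      · -- search right half
        have hi : bisectLeft fibo n 0 10 = 8 := by rw [bis_0_10]; norm_num [g0, g1, g2]
        rw [show fibo.length = 10 from rfl, hi]
        norm_num [fibo]
        split_ifs with hc
        · exact (F_val_55 n (by omega)).symm
        · exact (F_val_34 n (by omega)).symm
      · -- search left half
        by_cases g3 : (21:Int) < n
        · -- search right half
          have hi : bisectLeft fibo n 0 10 = 7 := by rw [bis_0_10]; norm_num [g0, g1, g2, g3]
          rw [show fibo.length = 10 from rfl, hi]
          norm_num [fibo]
          split_ifs with hc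
          · exact (F_val_34 n (by omega)).symm
          · exact (F_val_21 n (by omega)).symm
        · -- search left half
          have hi : bisectLeft fibo n 0 10 = 6 := by rw [bis_0_10]; norm_num [g0, g1, g2, g3]
          rw [show fibo.length = 10 from rfl, hi]
          norm_num [fibo]
          split_ifs with hc
          · exact (F_val_21 n (by omega)).symm
          · exact (F_val_13 n (by omega)).symm
  · -- search left half
    by_cases g1 : (3:Int) < n
    · -- search right half
      by_cases g2 : (8:Int) < n
      · -- search right half
        have hi : bisectLeft fibo n 0 10 = 5 := by rw [bis_0_10]; norm_num [g0, g1, g2]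
        rw [show fibo.length = 10 from rfl, hi]
        norm_num [fibo]
        split_ifs with hc
        · exact (F_val_13 n (by omega)).symm
        · exact (F_val_8 n (by omega)).symm
      · -- search left half
        by_cases g3 : (5:Int) < n
        · -- search right half
          have hi : bisectLeft fibo n 0 10 = 4 := by rw [bis_0_10]; norm_num [g0, g1, g2, g3]
          rw [show fibo.length = 10 from rfl, hi]
          norm_num [fibo]
          split_ifs with hc
          · exact (F_val_8 n (by omega)).symm
          · exact (F_val_5 n (by omega)).symm
        · -- search left half
          have hi : bisectLeft fibo n 0 10 = 3 := by rw [bis_0_10]; norm_num [g0, g1, g2, g3]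
          rw [show fibo.length = 10 from rfl, hi]
          norm_num [fibo]
          split_ifs with hc
          · exact (F_val_5 n (by omega)).symm
          · exact (F_val_3 n (by omega)).symm
    · -- search left half
      by_cases g2 : (2:Int) < n
      · -- search right half
        have hi : bisectLeft fibo n 0 10 = 2 := by rw [bis_0_10]; norm_num [g0, g1, g2]
        rw [show fibo.length = 10 from rfl, hi]
        norm_num [fibo]
        split_ifs with hc
        · exact (F_val_3 n (by omega)).symm
        · exact (F_val_2 n (by omega)).symm
      · -- search left half
        by_cases g3 : (1:Int) < n
        · -- search right half
          have hi : bisectLeft fibo n 0 10 = 1 := by rw [bis_0_10]; norm_num [g0, g1, g2, g3]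
          rw [show fibo.length = 10 from rfl, hi]
          norm_num [fibo]
          split_ifs with hc
          · exact (F_val_2 n (by omega)).symm
          · exact (F_val_1 n (by omega)).symm
        · -- search left half
          have hi : bisectLeft fibo n 0 10 = 0 := by rw [bis_0_10]; norm_num [g0, g1, g2, g3]
          rw [show fibo.length = 10 from rfl, hi]
          norm_num [fibo]
          exact (F_val_1 n (by omega)).symm

-- ===== VERDICT (by name: the statement is the Claim_ definition above) =====
theorem getCloserFibo_spec : Claim_equal_getCloserFibo := by
  intro n hd
  have hb : -2147483648 ≤ n ∧ n ≤ 2147483648 := by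
    simpa [Dom_getCloserFibo, pvDomInt] using hd
  unfold Spec_getCloserFibo
  rw [A_eval n hb.1 hb.2, B_eval n]
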